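-- pv_equiv track=rewrite | github.com/saurabh-maurya/NPTEL-Python-Assignment | week4.py | transcript
-- ===== SOURCE A (Python) =====
-- def transcript(coursedetails,studentdetails,grades):
--     m=[]
--     studentdetails=sorted(studentdetails)
--     for i in range(0,len(studentdetails)) :
--         l=[]
--         for j in range(0,len(grades)) :
--             if studentdetails[i][0]==grades[j][0] :
--                 for k in range(0,len(coursedetails)) :
--                     if grades[j][1]==coursedetails[k][0] :
--                         x=(coursedetails[k][0],coursedetails[k][1],grades[j][2])
--                 l.append(x)
--             l=sorted(l)
--             y=(studentdetails[i][0],studentdetails[i][1],l)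
--         m.append(y)
--     return(m)
-- ===== SOURCE B (Python) =====
-- def transcript(coursedetails, studentdetails, grades):
--     courses = {}
--     for cid, cname in coursedetails:
--         courses[cid] = cname
--     by_student = {}
--     for sid, cid, g in grades:
--         by_student[sid] = by_student.get(sid, []) + [(cid, g)]
--     return [(sid, name,
--              sorted((cid, courses[cid], g) for cid, g in by_student.get(sid, [])))
--             for sid, name in sorted(studentdetails)]
-- ===== Notes on version B (the rewrite author's own statement) =====
-- stated objective: faster
-- what changed: B replaces A's three nested scans (for each student, scan all grades and for each grade scan all courses, re-sorting the partial list after every grade) with two dict indexes built in one pass each (course id -> name, student id -> grade list) and a single map over the sorted students with one final sort per student.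
import Mathlib
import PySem

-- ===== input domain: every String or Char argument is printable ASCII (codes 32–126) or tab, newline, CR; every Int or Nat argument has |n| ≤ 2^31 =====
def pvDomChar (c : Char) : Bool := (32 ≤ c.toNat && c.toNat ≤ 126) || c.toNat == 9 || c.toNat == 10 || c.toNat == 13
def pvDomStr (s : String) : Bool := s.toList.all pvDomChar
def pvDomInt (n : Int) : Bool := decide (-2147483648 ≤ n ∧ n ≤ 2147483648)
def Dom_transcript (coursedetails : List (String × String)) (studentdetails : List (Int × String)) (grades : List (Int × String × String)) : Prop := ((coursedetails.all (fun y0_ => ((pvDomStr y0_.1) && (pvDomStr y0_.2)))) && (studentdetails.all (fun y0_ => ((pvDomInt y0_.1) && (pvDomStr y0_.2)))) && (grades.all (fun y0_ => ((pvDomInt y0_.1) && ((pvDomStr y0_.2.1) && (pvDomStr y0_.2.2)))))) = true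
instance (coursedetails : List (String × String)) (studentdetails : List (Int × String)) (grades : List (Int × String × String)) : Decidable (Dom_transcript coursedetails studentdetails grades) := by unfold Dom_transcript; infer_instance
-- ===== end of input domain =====

-- B builds two dict indexes (course id -> name, student id -> grade list) in one pass each and emits each
-- sorted student by lookup with one final sort, instead of A's per-student scan of all grades with a linear
-- course scan and a re-sort after every grade (objective: faster).

-- Python's sorted() on triples of strings compares tuples lexicographically: this key realises that order.
def keyT (t : String × String × String) : Lex (String × Lex (String × String)) :=
  toLex (t.1, toLex (t.2.1, t.2.2))

-- ===== PORT A =====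
-- for k in range(0,len(coursedetails)): if grades[j][1]==coursedetails[k][0]: x=(…)   (x threads through)
def courseScan (coursedetails : List (String × String)) (g : Int × String × String)
    (x : Option (String × String × String)) : Option (String × String × String) :=
  coursedetails.foldl (fun x c => if g.2.1 == c.1 then some (c.1, c.2, g.2.2) else x) x

-- one iteration of the j-loop over grades; state = (l, x, y) with x, y as Options (none = not yet assigned)
def gradeStep (coursedetails : List (String × String)) (s : Int × String)
    (st : List (String × String × String) × Option (String × String × String) × Option (Int × String × List (String × String × String)))
    (g : Int × String × String) :
    List (String × String × String) × Option (String × String × String) × Option (Int × String × List (String × String × String)) :=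
  let lx :=
    if s.1 == g.1 then
      let x := courseScan coursedetails g st.2.1
      (st.1 ++ [x.getD ("", "", "")], x)
    else (st.1, st.2.1)
  let l := PySem.List.sorted lx.1 keyT
  (l, lx.2, some (s.1, s.2, l))

-- one iteration of the i-loop over the sorted students; state = (m, x)
def studentStep (coursedetails : List (String × String)) (grades : List (Int × String × String))
    (st : List (Int × String × List (String × String × String)) × Option (String × String × String))
    (s : Int × String) :
    List (Int × String × List (String × String × String)) × Option (String × String × String) :=
  let r := grades.foldl (gradeStep coursedetails s) ([], st.2, none)
  (st.1 ++ [r.2.2.getD (0, "", [])], r.2.1)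

def transcript (coursedetails : List (String × String)) (studentdetails : List (Int × String)) (grades : List (Int × String × String)) : List (Int × String × (List (String × String × String))) :=
  ((PySem.List.sorted2 studentdetails (fun s => s.1) (fun s => s.2)).foldl
    (studentStep coursedetails grades) ([], none)).1

-- ===== PORT B =====
def transcript_alt (coursedetails : List (String × String)) (studentdetails : List (Int × String)) (grades : List (Int × String × String)) : List (Int × String × (List (String × String × String))) :=
  let courses := coursedetails.foldl (fun d p => d.insert p.1 p.2) (PySem.Dict.empty : PySem.Dict String String)
  let byStudent := grades.foldl (fun d g => d.modify g.1 [] (fun l => l ++ [(g.2.1, g.2.2)]))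
    (PySem.Dict.empty : PySem.Dict Int (List (String × String)))
  (PySem.List.sorted2 studentdetails (fun s => s.1) (fun s => s.2)).map (fun s =>
    (s.1, s.2, PySem.List.sorted ((byStudent.getD s.1 []).map (fun cg => (cg.1, courses.getD cg.1 "", cg.2))) keyT))

-- ===== PRECONDITION & SPEC =====
-- Pre_ excludes (a) grades == [] with studentdetails ≠ [] (A raises NameError: y never assigned) and
-- (b) inputs where a grade of a listed student names a course id absent from coursedetails (A raises
-- NameError or appends a stale tuple left in x; B raises KeyError there).
def Pre_transcript (coursedetails : List (String × String)) (studentdetails : List (Int × String)) (grades : List (Int × String × String)) : Prop :=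
  (studentdetails = [] ∨ grades ≠ []) ∧
  ∀ g ∈ grades, (∃ s ∈ studentdetails, s.1 = g.1) → g.2.1 ∈ coursedetails.map Prod.fst
instance (coursedetails : List (String × String)) (studentdetails : List (Int × String)) (grades : List (Int × String × String)) : Decidable (Pre_transcript coursedetails studentdetails grades) := by unfold Pre_transcript; infer_instance
def pvWitness_transcript : (List (String × String)) × (List (Int × String)) × (List (Int × String × String)) :=
  ([("c1", "Calculus")], [(1, "Ann")], [(1, "c1", "A")])

def Spec_transcript (coursedetails : List (String × String)) (studentdetails : List (Int × String)) (grades : List (Int × String × String)) (out : List (Int × String × (List (String × String × String)))) : Prop := out = transcript_alt coursedetails studentdetails grades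
instance (coursedetails : List (String × String)) (studentdetails : List (Int × String)) (grades : List (Int × String × String)) (out : List (Int × String × (List (String × String × String)))) : Decidable (Spec_transcript coursedetails studentdetails grades out) := by unfold Spec_transcript; infer_instance

-- ===== CLAIM (what is proved, stated in full; the proofs are below) =====
def Claim_equal_transcript : Prop := ∀ (coursedetails : List (String × String)) (studentdetails : List (Int × String)) (grades : List (Int × String × String)), Dom_transcript coursedetails studentdetails grades → Pre_transcript coursedetails studentdetails grades → Spec_transcript coursedetails studentdetails grades (transcript coursedetails studentdetails grades)

-- ===== LEMMAS AND PROOFS =====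

-- the value x holds after the k-loop for course id c: the LAST matching course name (none if no match yet)
def lastCourse (coursedetails : List (String × String)) (c : String) : Option String :=
  coursedetails.foldl (fun acc p => if c == p.1 then some p.2 else acc) none

theorem keyT_injective : Function.Injective keyT := by
  intro a b h
  have h' := toLex.injective h
  have h1 : a.1 = b.1 := congrArg Prod.fst h'
  have h2 := toLex.injective (congrArg Prod.snd h')
  exact Prod.ext h1 (Prod.ext (congrArg Prod.fst h2) (congrArg Prod.snd h2))

theorem lastCourse_append (cd : List (String × String)) (p : String × String) (c : String) :
    lastCourse (cd ++ [p]) c = if c == p.1 then some p.2 else lastCourse cd c := by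
  simp [lastCourse, List.foldl_append]

theorem lastCourse_ne_none (cd : List (String × String)) (c : String)
    (h : c ∈ cd.map Prod.fst) : lastCourse cd c ≠ none := by
  induction cd using List.reverseRecOn with
  | nil => simp at h
  | append_singleton cd p ih =>
    rw [lastCourse_append]
    by_cases hc : c = p.1
    · simp [hc]
    · have : c ∈ cd.map Prod.fst := by
        simp only [List.map_append, List.mem_append] at h
        rcases h with h | h
        · exact h
        · simp at h; exact absurd h hc
      simp [hc, ih this]

theorem courseScan_eq (cd : List (String × String)) (g : Int × String × String)
    (x0 : Option (String × String × String)) :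
    courseScan cd g x0 =
      match lastCourse cd g.2.1 with
      | some n => some (g.2.1, n, g.2.2)
      | none => x0 := by
  induction cd using List.reverseRecOn generalizing x0 with
  | nil => simp [courseScan, lastCourse]
  | append_singleton cd p ih =>
    rw [lastCourse_append]
    simp only [courseScan, List.foldl_append, List.foldl_cons, List.foldl_nil]
    by_cases hc : g.2.1 = p.1
    · simp [hc]
    · have hb : (g.2.1 == p.1) = false := by simp [hc]
      simp only [hb, Bool.false_eq_true, if_false]
      exact ih x0

theorem dict_courses_eq (cd : List (String × String)) (c : String) :
    (cd.foldl (fun d p => d.insert p.1 p.2) (PySem.Dict.empty : PySem.Dict String String)).getD c ""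
      = (lastCourse cd c).getD "" := by
  induction cd using List.reverseRecOn with
  | nil => rfl
  | append_singleton cd p ih =>
    rw [lastCourse_append]
    simp only [List.foldl_append, List.foldl_cons, List.foldl_nil]
    rw [PySem.Dict.getD_insert]
    by_cases hc : c = p.1
    · simp [hc]
    · simp [hc, ih]

theorem group_eq (gr : List (Int × String × String)) (sid : Int) :
    ((gr.foldl (fun d g => d.modify g.1 [] (fun l => l ++ [(g.2.1, g.2.2)]))
        (PySem.Dict.empty : PySem.Dict Int (List (String × String)))).getD sid [])
      = (gr.filter (fun g => g.1 == sid)).map (fun g => (g.2.1, g.2.2)) := by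
  have hm : gr.foldl (fun d g => d.modify g.1 [] (fun l => l ++ [(g.2.1, g.2.2)]))
        (PySem.Dict.empty : PySem.Dict Int (List (String × String)))
      = (gr.map (fun g => (g.1, (g.2.1, g.2.2)))).foldl
          (fun d p => d.modify p.1 [] (fun l => l ++ [p.2])) PySem.Dict.empty := by
    rw [List.foldl_map]
  rw [hm, PySem.Dict.getD_foldl_modify_append, List.filter_map, List.map_map]
  rfl

-- the triple A appends for grade g of the current student (under Pre_ lastCourse is some _)
def trip (cd : List (String × String)) (g : Int × String × String) : String × String × String :=
  (g.2.1, (lastCourse cd g.2.1).getD "", g.2.2)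

-- the per-student list both programs produce
def matched (cd : List (String × String)) (gr : List (Int × String × String)) (s : Int × String) :
    List (String × String × String) :=
  (gr.filter (fun g => s.1 == g.1)).map (trip cd)

theorem inner_eq (cd : List (String × String)) (s : Int × String)
    (gr : List (Int × String × String))
    (H : ∀ g ∈ gr, (s.1 == g.1) = true → lastCourse cd g.2.1 ≠ none) :
    ∀ x0, (gr.foldl (gradeStep cd s) ([], x0, none)).1
        = PySem.List.sorted (matched cd gr s) keyT
      ∧ (gr.foldl (gradeStep cd s) ([], x0, none)).2.2
        = if gr = [] then none
          else some (s.1, s.2, PySem.List.sorted (matched cd gr s) keyT) := by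
  induction gr using List.reverseRecOn with
  | nil => intro x0; exact ⟨rfl, by simp⟩
  | append_singleton gr g ih =>
    intro x0
    have H' : ∀ g' ∈ gr, (s.1 == g'.1) = true → lastCourse cd g'.2.1 ≠ none := by
      intro g' hg' hm; exact H g' (by simp [hg']) hm
    obtain ⟨ih1, _⟩ := ih H' x0
    rw [List.foldl_append]
    set st := gr.foldl (gradeStep cd s) ([], x0, none) with hst
    by_cases hm : (s.1 == g.1) = true
    · have hlc : lastCourse cd g.2.1 ≠ none := H g (by simp) hm
      obtain ⟨n, hn⟩ := Option.ne_none_iff_exists'.mp hlc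
      have hscan : courseScan cd g st.2.1 = some (trip cd g) := by
        rw [courseScan_eq, hn]; simp [trip, hn]
      have hmatched : matched cd (gr ++ [g]) s = matched cd gr s ++ [trip cd g] := by
        simp [matched, List.filter_append, hm]
      have hsort : PySem.List.sorted (st.1 ++ [trip cd g]) keyT
          = PySem.List.sorted (matched cd (gr ++ [g]) s) keyT := by
        apply PySem.List.sorted_eq_sorted_of_perm _ _ _ keyT_injective
        rw [hmatched, ih1]
        exact (PySem.List.sorted_perm _ _ _).append_right _
      simp only [List.foldl_cons, List.foldl_nil, gradeStep, hm, if_true, hscan, Option.getD_some]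
      exact ⟨hsort, by simp [hsort]⟩
    · have hmatched : matched cd (gr ++ [g]) s = matched cd gr s := by
        simp [matched, List.filter_append, hm]
      have hsort : PySem.List.sorted st.1 keyT = PySem.List.sorted (matched cd (gr ++ [g]) s) keyT := by
        rw [hmatched, ih1, PySem.List.sorted_sorted]
      simp only [List.foldl_cons, List.foldl_nil, gradeStep, hm, Bool.false_eq_true, if_false]
      exact ⟨hsort, by simp [hsort]⟩

theorem outer_eq (cd : List (String × String)) (gr : List (Int × String × String))
    (hgr : gr ≠ []) :
    ∀ (students : List (Int × String)) (m0 : List (Int × String × List (String × String × String)))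
      (x0 : Option (String × String × String)),
      (∀ s ∈ students, ∀ g ∈ gr, (s.1 == g.1) = true → lastCourse cd g.2.1 ≠ none) →
      (students.foldl (studentStep cd gr) (m0, x0)).1
        = m0 ++ students.map (fun s => (s.1, s.2, PySem.List.sorted (matched cd gr s) keyT)) := by
  intro students
  induction students with
  | nil => intro m0 x0 _; simp
  | cons s rest ih =>
    intro m0 x0 H
    have Hs := H s (by simp)
    obtain ⟨h1, h2⟩ := inner_eq cd s gr Hs x0
    simp only [List.foldl_cons, studentStep]
    rw [h2, if_neg hgr]
    rw [ih _ _ (fun s' hs' => H s' (by simp [hs']))]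
    simp

theorem alt_eq (cd : List (String × String)) (sd : List (Int × String))
    (gr : List (Int × String × String)) :
    transcript_alt cd sd gr
      = (PySem.List.sorted2 sd (fun s => s.1) (fun s => s.2)).map
          (fun s => (s.1, s.2, PySem.List.sorted ((gr.filter (fun g => g.1 == s.1)).map (trip cd)) keyT)) := by
  unfold transcript_alt
  apply List.map_congr_left
  intro s _
  rw [group_eq, List.map_map]
  congr 2
  congr 1
  apply List.map_congr_left
  intro g _
  simp [trip, dict_courses_eq]

-- ===== VERDICT (by name: the statement is the Claim_ definition above) =====
theorem transcript_spec : Claim_equal_transcript := by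
  intro cd sd gr _ hpre
  unfold Spec_transcript
  rw [alt_eq]
  rcases hpre with ⟨hempty, hcourses⟩
  rcases hempty with hsd | hgr
  · subst hsd; rfl
  · unfold transcript
    rw [outer_eq cd gr hgr _ [] none]
    · apply List.map_congr_left
      intro s _
      have : (gr.filter (fun g => g.1 == s.1)) = (gr.filter (fun g => s.1 == g.1)) := by
        apply List.filter_congr
        intro g _
        simp [eq_comm]
      rw [this]
      rfl
    · intro s hs g hg hm
      apply lastCourse_ne_none
      apply hcourses g hg
      refine ⟨s, ?_, by simpa using hm⟩
      have := (PySem.List.sorted2_perm sd (fun s => s.1) (fun s => s.2) false).mem_iff.mp hs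
      exact this
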